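-- pv_equiv track=rewrite | github.com/Elli-Lee/ocean | algorithm/basic/3rd_week/03_07_get_receiver_top_orders.py | get_receiver_top_orders_stack
-- ===== SOURCE A (Python) =====
-- def get_receiver_top_orders_stack(heights):
--   result_stack = [0]
--   for i in range(1, len(heights)): # 바로 앞에거가 나보다 길면 그냥 바로 append
--     if heights[i-1] > heights[i]:
--       result_stack.append(i)
--     else: # 바로 앞에거가 나보다 짧지만 이미 result_stack이 0이 아니라면 앞에랑 똑같은 값
--       if result_stack[i-1] != 0:
--         result_stack.append(result_stack[i-1])
--         continue
--       result_stack.append(0) # 앞에거가 나보다 짧은데 얘도 아무도 못 수신하면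
--
--   return result_stack
-- ===== SOURCE B (Python) =====
-- def get_receiver_top_orders_stack(heights):
--   n = len(heights)
--   # stage 1: run starts = index 0 plus every position where the previous height is taller
--   drops = [0] + [i for i in range(1, n) if heights[i - 1] > heights[i]]
--   # stage 2: run-length expand: each run start d repeats until the next run start
--   return [d for d, nxt in zip(drops, drops[1:] + [n]) for _ in range(nxt - d)]
-- ===== Notes on version B (the rewrite author's own statement) =====
-- stated objective: alternative
-- what changed: B is a two-stage run-length construction: it first collects the run-start positions (index 0 plus every index whose predecessor is taller), then expands each run start over its run via zip with the next start; A instead builds the answer element-by-element in one loop that re-reads its own result list.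
-- intended difference: On the empty list A returns a one-element list holding index 0 (the leftover seed of its result list, the index of a non-existent element) while B returns the intended empty list; they agree on every non-empty input. — e.g. on get_receiver_top_orders_stack([]): A returns [0], B returns []
import Mathlib
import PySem

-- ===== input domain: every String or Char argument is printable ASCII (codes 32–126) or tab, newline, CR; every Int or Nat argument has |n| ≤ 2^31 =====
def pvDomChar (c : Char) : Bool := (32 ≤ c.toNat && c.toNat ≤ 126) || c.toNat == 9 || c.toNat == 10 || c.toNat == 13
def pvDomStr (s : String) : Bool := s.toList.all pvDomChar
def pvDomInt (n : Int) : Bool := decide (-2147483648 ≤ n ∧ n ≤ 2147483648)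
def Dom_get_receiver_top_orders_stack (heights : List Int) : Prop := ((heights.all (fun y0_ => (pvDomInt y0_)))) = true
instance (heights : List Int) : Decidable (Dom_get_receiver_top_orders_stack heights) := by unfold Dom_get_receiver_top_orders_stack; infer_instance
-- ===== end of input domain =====

-- B: a two-stage run-length construction (collect run-start indices, then expand each run)
-- instead of A's single loop that re-reads its own result list; on the empty list B returns
-- the empty list where A returns its leftover seed (the intended difference D_ below).

-- ===== PORT A =====
def get_receiver_top_orders_stack (heights : List Int) : List Int :=
  (PySem.List.pyRange 1 (heights.length : Int) 1).foldl
    (fun rs i =>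
      if PySem.List.pyGetD heights (i - 1) 0 > PySem.List.pyGetD heights i 0 then
        rs ++ [i]
      else
        if PySem.List.pyGetD rs (i - 1) 0 ≠ 0 then
          rs ++ [PySem.List.pyGetD rs (i - 1) 0]
        else
          rs ++ [0]) [0]

-- ===== PORT B =====
def get_receiver_top_orders_stack_alt (heights : List Int) : List Int :=
  let n : Int := heights.length
  let drops : List Int :=
    [0] ++ (PySem.List.pyRange 1 n 1).filter
      (fun i => decide (PySem.List.pyGetD heights (i - 1) 0 > PySem.List.pyGetD heights i 0))
  (drops.zip (PySem.List.slice drops (some 1) none ++ [n])).flatMap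
    (fun p => List.replicate (p.2 - p.1).toNat p.1)

-- ===== PRECONDITION & SPEC =====
-- On the empty list A returns a one-element list holding index 0 (its leftover seed, the
-- index of a non-existent element) while B returns the intended empty list; they agree on
-- every non-empty input.
def D_get_receiver_top_orders_stack (heights : List Int) : Prop := heights = []
instance (heights : List Int) : Decidable (D_get_receiver_top_orders_stack heights) := by unfold D_get_receiver_top_orders_stack; infer_instance
def Spec_get_receiver_top_orders_stack (heights : List Int) (out : List Int) : Prop := ¬ D_get_receiver_top_orders_stack heights → out = get_receiver_top_orders_stack_alt heights
instance (heights : List Int) (out : List Int) : Decidable (Spec_get_receiver_top_orders_stack heights out) := by unfold Spec_get_receiver_top_orders_stack; infer_instance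
def pvDiffWitness_get_receiver_top_orders_stack : List Int := []
def pvDiffWitnessOut_get_receiver_top_orders_stack : (List Int) × (List Int) := ([0], [])

-- ===== CLAIM (what is proved, stated in full; the proofs are below) =====
def Claim_unchanged_get_receiver_top_orders_stack : Prop := ∀ (heights : List Int), Dom_get_receiver_top_orders_stack heights → Spec_get_receiver_top_orders_stack heights (get_receiver_top_orders_stack heights)
def Claim_changed_get_receiver_top_orders_stack : Prop := Dom_get_receiver_top_orders_stack (pvDiffWitness_get_receiver_top_orders_stack) ∧ D_get_receiver_top_orders_stack (pvDiffWitness_get_receiver_top_orders_stack) ∧ get_receiver_top_orders_stack (pvDiffWitness_get_receiver_top_orders_stack) = pvDiffWitnessOut_get_receiver_top_orders_stack.1 ∧ get_receiver_top_orders_stack_alt (pvDiffWitness_get_receiver_top_orders_stack) = pvDiffWitnessOut_get_receiver_top_orders_stack.2 ∧ pvDiffWitnessOut_get_receiver_top_orders_stack.1 ≠ pvDiffWitnessOut_get_receiver_top_orders_stack.2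
def Claim_exact_get_receiver_top_orders_stack : Prop := ∀ (heights : List Int), Dom_get_receiver_top_orders_stack heights → D_get_receiver_top_orders_stack heights → get_receiver_top_orders_stack heights ≠ get_receiver_top_orders_stack_alt heights

-- ===== LEMMAS AND PROOFS =====

-- A's loop body and B's filter predicate, named for the proofs
def pvStep (heights : List Int) : List Int → Int → List Int :=
  fun rs i =>
    if PySem.List.pyGetD heights (i - 1) 0 > PySem.List.pyGetD heights i 0 then
      rs ++ [i]
    else
      if PySem.List.pyGetD rs (i - 1) 0 ≠ 0 then
        rs ++ [PySem.List.pyGetD rs (i - 1) 0]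
      else
        rs ++ [0]

def pvP (heights : List Int) : Int → Bool :=
  fun i => decide (PySem.List.pyGetD heights (i - 1) 0 > PySem.List.pyGetD heights i 0)

-- run-length expansion of a list of run starts with final bound b, structurally
def pvG : List Int → Int → List Int
  | [], _ => []
  | [d], b => List.replicate (b - d).toNat d
  | d :: d' :: ds, b => List.replicate (d' - d).toNat d ++ pvG (d' :: ds) b

-- B's zip/flatMap expansion is pvG
theorem pv_flat_eq_g (ds : List Int) (b : Int) :
    (ds.zip (ds.tail ++ [b])).flatMap (fun p => List.replicate (p.2 - p.1).toNat p.1)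
      = pvG ds b := by
  induction ds with
  | nil => simp [pvG]
  | cons d ds ih =>
    cases ds with
    | nil => simp [pvG]
    | cons d' ds' =>
      simp only [List.tail_cons, List.cons_append, List.zip_cons_cons, List.flatMap_cons] at *
      rw [ih]
      rfl

-- appending a new run start m closes the previous runs at m
theorem pv_g_append (ds : List Int) (m b : Int) (h : ds ≠ []) :
    pvG (ds ++ [m]) b = pvG ds m ++ List.replicate (b - m).toNat m := by
  induction ds with
  | nil => exact absurd rfl h
  | cons d ds ih =>
    cases ds with
    | nil => simp [pvG]
    | cons d' ds' =>
      have ih' := ih (by simp)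
      rw [List.cons_append] at ih'
      show List.replicate (d' - d).toNat d ++ pvG (d' :: (ds' ++ [m])) b =
           (List.replicate (d' - d).toNat d ++ pvG (d' :: ds') m) ++ List.replicate (b - m).toNat m
      rw [ih', List.append_assoc]

-- raising the bound by one appends one more copy of the last run start
theorem pv_g_succ (ds : List Int) (b l : Int) (hl : ds.getLast? = some l) (hle : l ≤ b) :
    pvG ds (b + 1) = pvG ds b ++ [l] := by
  induction ds with
  | nil => simp at hl
  | cons d ds ih =>
    cases ds with
    | nil =>
      simp at hl
      subst hl
      show List.replicate (b + 1 - d).toNat d = List.replicate (b - d).toNat d ++ [d]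
      have h1 : (b + 1 - d).toNat = (b - d).toNat + 1 := by omega
      rw [h1, List.replicate_succ']
    | cons d' ds' =>
      have hl' : (d' :: ds').getLast? = some l := by
        rwa [List.getLast?_cons_cons] at hl
      show List.replicate (d' - d).toNat d ++ pvG (d' :: ds') (b + 1) = _
      rw [ih hl']
      show _ = (List.replicate (d' - d).toNat d ++ pvG (d' :: ds') b) ++ [l]
      rw [List.append_assoc]

-- element just appended read back at index = old length
theorem pv_pyGetD_append_len (l : List Int) (x d : Int) :
    PySem.List.pyGetD (l ++ [x]) (l.length : Int) d = x := by
  rw [PySem.List.pyGetD_eq_getElem _ _ (by positivity) (by simp)]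
  simp

-- joint invariant of A's fold and B's staged construction over range(1, n)
theorem pv_invariant (heights : List Int) (n : ℕ) (hn : 1 ≤ n) :
    (PySem.List.pyRange 1 (n : Int) 1).foldl (pvStep heights) [0]
      = pvG ((0 : Int) :: (PySem.List.pyRange 1 (n : Int) 1).filter (pvP heights)) (n : Int)
    ∧ ((PySem.List.pyRange 1 (n : Int) 1).foldl (pvStep heights) [0]).length = n
    ∧ ∃ l : Int,
        ((0 : Int) :: (PySem.List.pyRange 1 (n : Int) 1).filter (pvP heights)).getLast? = some l
        ∧ l ≤ (n : Int) - 1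
        ∧ PySem.List.pyGetD ((PySem.List.pyRange 1 (n : Int) 1).foldl (pvStep heights) [0])
            ((n : Int) - 1) 0 = l := by
  induction n with
  | zero => omega
  | succ m ih =>
    by_cases hm : 1 ≤ m
    · obtain ⟨h1, h2, l, hl, hlb, hlast⟩ := ih hm
      have hsplit : PySem.List.pyRange 1 ((m : Int) + 1) 1
          = PySem.List.pyRange 1 (m : Int) 1 ++ [(m : Int)] :=
        PySem.List.pyRange_one_succ_right (by exact_mod_cast hm)
      simp only [Nat.cast_add, Nat.cast_one]
      rw [hsplit, List.foldl_concat, List.filter_append]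
      set rs := (PySem.List.pyRange 1 (m : Int) 1).foldl (pvStep heights) [0] with hrs
      have hidx : ((m : Int) + 1 - 1) = ((rs.length : ℕ) : Int) := by rw [h2]; ring
      by_cases hc : PySem.List.pyGetD heights ((m : Int) - 1) 0 > PySem.List.pyGetD heights (m : Int) 0
      · -- drop at m: A appends m, B gains the run start m
        have hpb : pvP heights (m : Int) = true := decide_eq_true hc
        have hf : List.filter (pvP heights) [(m : Int)] = [(m : Int)] := by
          simp [hpb]
        have hs : pvStep heights rs (m : Int) = rs ++ [(m : Int)] := by
          unfold pvStep; rw [if_pos hc]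
        rw [hf, hs]
        have hcons : (0 : Int) :: ((PySem.List.pyRange 1 (m : Int) 1).filter (pvP heights) ++ [(m : Int)])
            = ((0 : Int) :: (PySem.List.pyRange 1 (m : Int) 1).filter (pvP heights)) ++ [(m : Int)] := rfl
        refine ⟨?_, ?_, ?_⟩
        · rw [hcons, pv_g_append _ _ _ (by simp), ← h1,
              show ((m : Int) + 1 - (m : Int)).toNat = 1 by omega]
          simp
        · simp [h2]
        · exact Exists.intro (m : Int) (And.intro (by rw [List.getLast?_cons]; simp)
            (And.intro (by omega) (by rw [hidx, pv_pyGetD_append_len])))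
      · -- no drop at m: A's else branch appends rs[m-1] = l either way
        have hpb : pvP heights (m : Int) = false := decide_eq_false hc
        have hf : List.filter (pvP heights) [(m : Int)] = [] := by
          simp [hpb]
        have hs : pvStep heights rs (m : Int) = rs ++ [l] := by
          unfold pvStep
          rw [if_neg hc, ← hlast]
          by_cases hz : PySem.List.pyGetD rs ((m : Int) - 1) 0 = 0 <;> simp [hz]
        rw [hf, hs, List.append_nil]
        refine ⟨?_, ?_, ?_⟩
        · rw [h1, pv_g_succ _ _ l hl (by omega)]
        · simp [h2]
        · exact Exists.intro l (And.intro hl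
            (And.intro (by omega) (by rw [hidx, pv_pyGetD_append_len])))
    · have hm0 : m = 0 := by omega
      subst hm0
      refine ⟨?_, ?_, ⟨0, ?_, ?_, ?_⟩⟩ <;>
        simp [PySem.List.pyRange_one_eq_nil, pvG, PySem.List.pyGetD]

-- ===== VERDICT (by name: the statement is the Claim_ definition above) =====
theorem get_receiver_top_orders_stack_spec : Claim_unchanged_get_receiver_top_orders_stack := by
  intro heights _ hD
  have hne : heights ≠ [] := hD
  have hn : 1 ≤ heights.length := by
    cases heights with
    | nil => exact absurd rfl hne
    | cons a t => simp
  have hA : get_receiver_top_orders_stack heights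
      = (PySem.List.pyRange 1 (heights.length : Int) 1).foldl (pvStep heights) [0] := rfl
  have hB : get_receiver_top_orders_stack_alt heights
      = ((((0 : Int) :: (PySem.List.pyRange 1 (heights.length : Int) 1).filter (pvP heights)).zip
          (((0 : Int) :: (PySem.List.pyRange 1 (heights.length : Int) 1).filter (pvP heights)).tail
            ++ [(heights.length : Int)])).flatMap
          (fun p => List.replicate (p.2 - p.1).toNat p.1)) := by
    unfold get_receiver_top_orders_stack_alt
    simp only [PySem.List.slice_from_one, List.singleton_append, List.tail_cons]
    rfl
  show get_receiver_top_orders_stack heights = get_receiver_top_orders_stack_alt heights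
  rw [hA, hB, pv_flat_eq_g, (pv_invariant heights heights.length hn).1]

theorem get_receiver_top_orders_stack_changed : Claim_changed_get_receiver_top_orders_stack := by
  unfold Claim_changed_get_receiver_top_orders_stack; decide

theorem get_receiver_top_orders_stack_tight : Claim_exact_get_receiver_top_orders_stack := by
  intro heights _ hD
  have h : heights = [] := hD
  subst h
  decide
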